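-- pv_equiv track=rewrite | github.com/xaxion99/Advent_of_Coding_2025 | aoc25/christmas/day_6.py | _split_into_bands
-- ===== SOURCE A (Python) =====
-- from typing import List
--
-- def _split_into_bands(lines: List[str]) -> List[tuple[int, int, str]]:
--     if not lines:
--         return []
--
--     ops_line = lines[-1]
--     num_rows = len(lines) - 1
--     width = len(ops_line)
--
--     last_used = -1
--     for c in range(width):
--         if ops_line[c] in ("*", "+"):
--             last_used = c
--         else:
--             for r in range(num_rows):
--                 if lines[r][c].isdigit():
--                     last_used = c
--                     break
--
--     if last_used == -1:
--         return []
--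
--     width = last_used + 1
--
--     def is_separator(col: int) -> bool:
--         if ops_line[col] in ("*", "+"):
--             return False
--         for r in range(num_rows):
--             if not lines[r][col].isspace():
--                 return False
--         return True
--
--     bands: List[tuple[int, int, str]] = []
--     col = 0
--
--     while col < width:
--         while col < width and is_separator(col):
--             col += 1
--         if col >= width:
--             break
--
--         start = col
--         while col < width and not is_separator(col):
--             col += 1
--         end = col
--
--         op_char = None
--         for c in range(start, end):
--             if ops_line[c] in ("*", "+"):
--                 op_char = ops_line[c]
--                 break
--
--         if op_char is None:
--             continue
--
--         bands.append((start, end, op_char))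
--
--     return bands
-- ===== SOURCE B (Python) =====
-- from typing import List
--
-- def _split_into_bands(lines: List[str]) -> List[tuple[int, int, str]]:
--     if not lines:
--         return []
--
--     *rows, ops_line = lines
--
--     def is_separator(col: int) -> bool:
--         if ops_line[col] in ("*", "+"):
--             return False
--         return all(row[col].isspace() for row in rows)
--
--     def used(c: int) -> bool:
--         return ops_line[c] in ("*", "+") or any(row[c].isdigit() for row in rows)
--
--     # width: scan from the right, stop at the first used column
--     width = 0
--     for c in reversed(range(len(ops_line))):
--         if used(c):
--             width = c + 1
--             break
--
--     # operator-centric: walk to each operator, expand its band in both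
--     # directions to the enclosing separators, then jump past the band
--     bands: List[tuple[int, int, str]] = []
--     c = 0
--     while c < width:
--         ch = ops_line[c]
--         if ch in ("*", "+"):
--             start = c
--             while start > 0 and not is_separator(start - 1):
--                 start -= 1
--             end = c + 1
--             while end < width and not is_separator(end):
--                 end += 1
--             bands.append((start, end, ch))
--             c = end
--         else:
--             c += 1
--     return bands
-- ===== Notes on version B (the rewrite author's own statement) =====
-- stated objective: alternative
-- what changed: A segments the grid left-to-right into content runs with separator-skip/content-skip while loops and then searches each run for an operator; B is operator-centric: it computes the width by a right-to-left scan that stops at the first used column, then walks to each operator character and expands that single band left and right to the enclosing separators, jumping past the band, so operator-free runs are never delimited at all.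
import Mathlib
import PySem

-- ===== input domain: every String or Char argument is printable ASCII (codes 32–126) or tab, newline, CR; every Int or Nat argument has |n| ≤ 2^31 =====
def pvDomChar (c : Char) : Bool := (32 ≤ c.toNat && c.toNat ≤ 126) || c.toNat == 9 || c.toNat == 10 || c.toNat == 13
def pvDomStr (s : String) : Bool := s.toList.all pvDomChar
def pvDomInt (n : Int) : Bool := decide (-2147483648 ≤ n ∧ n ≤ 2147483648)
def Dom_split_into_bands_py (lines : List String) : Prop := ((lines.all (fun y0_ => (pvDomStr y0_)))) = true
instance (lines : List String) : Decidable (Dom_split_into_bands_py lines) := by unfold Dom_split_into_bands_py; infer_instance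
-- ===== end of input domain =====

-- B replaces A's separator-skipping run segmentation by an operator-centric algorithm:
-- width by a right-to-left scan stopping at the first used column, then each operator
-- found is expanded left and right to the enclosing separators (objective: alternative).

-- ===== PORT A =====
-- Shared char access lines[r][c] / ops_line[c] (index always ≥ 0 in both programs).
-- Out-of-range reads (Python IndexError) return ' ' here; exactly those inputs are
-- excluded by Pre_split_into_bands_py below, so the port is faithful on Pre_.
def pvCh (s : List Char) (c : Nat) : Char := s.getD c ' '

def pvIsOp (ch : Char) : Bool := ch == '*' || ch == '+'

-- `for r in range(num_rows): if lines[r][c].isdigit(): last_used = c; break`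
def pvA_digitScan (rows : List (List Char)) (c : Nat) : Bool :=
  match rows with
  | [] => false
  | row :: rest => if PySem.Chars.isdigit (pvCh row c) then true else pvA_digitScan rest c

-- the first `for c in range(width)` loop computing last_used
def pvA_lastUsed (ops : List Char) (rows : List (List Char)) : Int :=
  (List.range ops.length).foldl
    (fun last c =>
      if pvIsOp (pvCh ops c) then (c : Int)
      else if pvA_digitScan rows c then (c : Int) else last) (-1)

-- the row loop inside is_separator
def pvA_spaceScan (rows : List (List Char)) (c : Nat) : Bool :=
  match rows with
  | [] => true
  | row :: rest =>
    if !(PySem.Chars.isspace (pvCh row c)) then false else pvA_spaceScan rest c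

def pvA_isSep (ops : List Char) (rows : List (List Char)) (c : Nat) : Bool :=
  if pvIsOp (pvCh ops c) then false else pvA_spaceScan rows c

-- `while col < width and is_separator(col): col += 1`
def pvA_skipSep (ops : List Char) (rows : List (List Char)) (width col : Nat) : Nat :=
  if h : col < width ∧ pvA_isSep ops rows col = true then
    pvA_skipSep ops rows width (col + 1)
  else col
termination_by width - col
decreasing_by omega

-- `while col < width and not is_separator(col): col += 1`
def pvA_skipCon (ops : List Char) (rows : List (List Char)) (width col : Nat) : Nat :=
  if h : col < width ∧ ¬ pvA_isSep ops rows col = true then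
    pvA_skipCon ops rows width (col + 1)
  else col
termination_by width - col
decreasing_by omega

-- `for c in range(start, end): if ops_line[c] in ("*","+"): op_char = ops_line[c]; break`
def pvA_findOp (ops : List Char) (cs : List Nat) : Option String :=
  match cs with
  | [] => none
  | c :: rest =>
    if pvIsOp (pvCh ops c) then some (String.ofList [pvCh ops c]) else pvA_findOp ops rest

-- lemmas the band loop's termination argument cites
theorem pvA_skipSep_ge (ops : List Char) (rows : List (List Char)) (width col : Nat) :
    col ≤ pvA_skipSep ops rows width col := by
  fun_induction pvA_skipSep ops rows width col with
  | case1 col h ih => omega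
  | case2 col h => omega

theorem pvA_skipCon_ge (ops : List Char) (rows : List (List Char)) (width col : Nat) :
    col ≤ pvA_skipCon ops rows width col := by
  fun_induction pvA_skipCon ops rows width col with
  | case1 col h ih => omega
  | case2 col h => omega

theorem pvA_skipSep_stop (ops : List Char) (rows : List (List Char)) (width col : Nat)
    (h : pvA_skipSep ops rows width col < width) :
    pvA_isSep ops rows (pvA_skipSep ops rows width col) = false := by
  fun_induction pvA_skipSep ops rows width col with
  | case1 col hc ih => exact ih h
  | case2 col hc => simp only [not_and] at hc; simpa using hc h

theorem pvA_skipCon_step (ops : List Char) (rows : List (List Char)) (width col : Nat)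
    (h1 : col < width) (h2 : pvA_isSep ops rows col = false) :
    pvA_skipCon ops rows width col = pvA_skipCon ops rows width (col + 1) := by
  rw [pvA_skipCon]; rw [dif_pos ⟨h1, by simp [h2]⟩]

theorem pvA_skipCon_gt (ops : List Char) (rows : List (List Char)) (width col : Nat)
    (h1 : col < width) (h2 : pvA_isSep ops rows col = false) :
    col + 1 ≤ pvA_skipCon ops rows width col := by
  rw [pvA_skipCon_step ops rows width col h1 h2]; exact pvA_skipCon_ge ops rows width (col + 1)

-- the outer `while col < width:` band loop
def pvA_bands (ops : List Char) (rows : List (List Char)) (width col : Nat) :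
    List (Int × Int × String) :=
  if h : col < width then
    if h2 : width ≤ pvA_skipSep ops rows width col then []
    else
      match pvA_findOp ops
          (List.range' (pvA_skipSep ops rows width col)
            (pvA_skipCon ops rows width (pvA_skipSep ops rows width col)
              - pvA_skipSep ops rows width col)) with
      | none => pvA_bands ops rows width (pvA_skipCon ops rows width (pvA_skipSep ops rows width col))
      | some op =>
        ((pvA_skipSep ops rows width col : Int),
         (pvA_skipCon ops rows width (pvA_skipSep ops rows width col) : Int), op)
          :: pvA_bands ops rows width (pvA_skipCon ops rows width (pvA_skipSep ops rows width col))
  else []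
termination_by width - col
decreasing_by
  all_goals
    have h3 := pvA_skipSep_ge ops rows width col
    have h4 : pvA_isSep ops rows (pvA_skipSep ops rows width col) = false :=
      pvA_skipSep_stop ops rows width col (by omega)
    have h5 := pvA_skipCon_gt ops rows width (pvA_skipSep ops rows width col) (by omega) h4
    omega

def split_into_bands_py (lines : List String) : List (Int × Int × String) :=
  match lines with
  | [] => []
  | _ :: _ =>
    let ops := (lines.getLastD "").toList
    let rows := (lines.dropLast).map String.toList
    if pvA_lastUsed ops rows = -1 then []
    else pvA_bands ops rows ((pvA_lastUsed ops rows + 1).toNat) 0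

-- ===== PORT B =====
-- B's is_separator: `if op: False; return all(row[col].isspace() for row in rows)`
def pvB_isSep (ops : List Char) (rows : List (List Char)) (c : Nat) : Bool :=
  if pvIsOp (pvCh ops c) then false
  else rows.all (fun row => PySem.Chars.isspace (pvCh row c))

def pvB_used (ops : List Char) (rows : List (List Char)) (c : Nat) : Bool :=
  pvIsOp (pvCh ops c) || rows.any (fun row => PySem.Chars.isdigit (pvCh row c))

-- `for c in reversed(range(len(ops_line))): if used(c): width = c + 1; break`
def pvB_widthRev (ops : List Char) (rows : List (List Char)) : Nat → Nat
  | 0 => 0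
  | c + 1 => if pvB_used ops rows c then c + 1 else pvB_widthRev ops rows c

-- `while start > 0 and not is_separator(start - 1): start -= 1`
def pvB_lexp (ops : List Char) (rows : List (List Char)) (s : Nat) : Nat :=
  if h : 0 < s ∧ pvB_isSep ops rows (s - 1) = false then pvB_lexp ops rows (s - 1)
  else s
termination_by s
decreasing_by omega

-- `while end < width and not is_separator(end): end += 1`
def pvB_rexp (ops : List Char) (rows : List (List Char)) (width e : Nat) : Nat :=
  if h : e < width ∧ pvB_isSep ops rows e = false then pvB_rexp ops rows width (e + 1)
  else e
termination_by width - e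
decreasing_by omega

theorem pvB_rexp_ge (ops : List Char) (rows : List (List Char)) (width e : Nat) :
    e ≤ pvB_rexp ops rows width e := by
  fun_induction pvB_rexp ops rows width e with
  | case1 e h ih => omega
  | case2 e h => omega

-- the operator-driven `while c < width:` loop
def pvB_loop (ops : List Char) (rows : List (List Char)) (width c : Nat) :
    List (Int × Int × String) :=
  if h : c < width then
    if pvIsOp (pvCh ops c) then
      ((pvB_lexp ops rows c : Int), (pvB_rexp ops rows width (c + 1) : Int),
        String.ofList [pvCh ops c])
        :: pvB_loop ops rows width (pvB_rexp ops rows width (c + 1))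
    else pvB_loop ops rows width (c + 1)
  else []
termination_by width - c
decreasing_by
  · have := pvB_rexp_ge ops rows width (c + 1); omega
  · omega

def split_into_bands_py_alt (lines : List String) : List (Int × Int × String) :=
  match lines with
  | [] => []
  | _ :: _ =>
    let ops := (lines.getLastD "").toList
    let rows := (lines.dropLast).map String.toList
    pvB_loop ops rows (pvB_widthRev ops rows ops.length) 0

-- ===== PRECONDITION & SPEC =====
-- Pre_ excludes exactly the inputs on which Python A raises IndexError: a non-operator
-- column c of the last line together with some grid row shorter than c+1 that A's row
-- scan reaches (every earlier row is in range at c and holds no digit there).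
def Pre_split_into_bands_py (lines : List String) : Prop :=
  ∀ c < (lines.getLastD "").toList.length,
    pvIsOp (pvCh (lines.getLastD "").toList c) = true ∨
    ∀ r < lines.length - 1,
      (lines.getD r "").toList.length ≤ c →
      ∃ r' < r, ((lines.getD r' "").toList.length ≤ c ∨
                 PySem.Chars.isdigit (pvCh (lines.getD r' "").toList c) = true)
instance (lines : List String) : Decidable (Pre_split_into_bands_py lines) := by
  unfold Pre_split_into_bands_py; infer_instance

def pvWitness_split_into_bands_py : List String := [" 1  2", " 3  4", " +  *"]

def Spec_split_into_bands_py (lines : List String) (out : List (Int × Int × String)) : Prop := out = split_into_bands_py_alt lines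
instance (lines : List String) (out : List (Int × Int × String)) : Decidable (Spec_split_into_bands_py lines out) := by unfold Spec_split_into_bands_py; infer_instance

-- ===== CLAIM (what is proved, stated in full; the proofs are below) =====
def Claim_equal_split_into_bands_py : Prop := ∀ (lines : List String), Dom_split_into_bands_py lines → Pre_split_into_bands_py lines → Spec_split_into_bands_py lines (split_into_bands_py lines)

-- ===== LEMMAS AND PROOFS =====

theorem pv_spaceScan_eq (rows : List (List Char)) (c : Nat) :
    pvA_spaceScan rows c = rows.all (fun row => PySem.Chars.isspace (pvCh row c)) := by
  induction rows with
  | nil => rfl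
  | cons row rest ih =>
    rw [pvA_spaceScan, ih, List.all_cons]
    cases h : PySem.Chars.isspace (pvCh row c) <;> simp [h]

-- B's is_separator is A's is_separator
theorem pv_sep_eq (ops : List Char) (rows : List (List Char)) (c : Nat) :
    pvB_isSep ops rows c = pvA_isSep ops rows c := by
  rw [pvB_isSep, pvA_isSep, pv_spaceScan_eq]

theorem pv_digitScan_eq (rows : List (List Char)) (c : Nat) :
    pvA_digitScan rows c = rows.any (fun row => PySem.Chars.isdigit (pvCh row c)) := by
  induction rows with
  | nil => rfl
  | cons row rest ih =>
    rw [pvA_digitScan, ih, List.any_cons]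
    cases h : PySem.Chars.isdigit (pvCh row c) <;> simp [h]

-- A's last_used scan and B's right-to-left width scan agree
theorem pv_width_eq (ops : List Char) (rows : List (List Char)) (n : Nat) :
    (List.range n).foldl
        (fun last c =>
          if pvIsOp (pvCh ops c) then (c : Int)
          else if pvA_digitScan rows c then (c : Int) else last) (-1)
      = (pvB_widthRev ops rows n : Int) - 1 := by
  induction n with
  | zero => simp [pvB_widthRev]
  | succ n ih =>
    rw [List.range_succ, List.foldl_append, ih]
    simp only [List.foldl_cons, List.foldl_nil, pvB_widthRev]
    rw [pv_digitScan_eq]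
    cases h1 : pvIsOp (pvCh ops n)
    · cases h2 : rows.any (fun row => PySem.Chars.isdigit (pvCh row n)) <;>
        simp only [h1, h2, pvB_used, Bool.false_or, if_true, if_false] <;> push_cast <;> omega
    · simp only [h1, pvB_used, Bool.true_or, if_true]; push_cast; omega

theorem pv_lastUsed_eq (ops : List Char) (rows : List (List Char)) :
    pvA_lastUsed ops rows = (pvB_widthRev ops rows ops.length : Int) - 1 :=
  pv_width_eq ops rows ops.length

-- B's right expansion is A's content-skipping loop
theorem pv_rexp_eq (ops : List Char) (rows : List (List Char)) (width e : Nat) :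
    pvB_rexp ops rows width e = pvA_skipCon ops rows width e := by
  fun_induction pvB_rexp ops rows width e with
  | case1 e h ih =>
    rw [ih, pvA_skipCon_step ops rows width e h.1 (by rw [← pv_sep_eq]; exact h.2)]
  | case2 e h =>
    rw [pvA_skipCon]
    rw [dif_neg (by intro hx; exact h ⟨hx.1, by rw [pv_sep_eq]; simpa using hx.2⟩)]

-- an operator column is never a separator
theorem pv_op_not_sep (ops : List Char) (rows : List (List Char)) (c : Nat)
    (h : pvIsOp (pvCh ops c) = true) : pvA_isSep ops rows c = false := by
  rw [pvA_isSep, if_pos h]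

theorem pv_sep_not_op (ops : List Char) (rows : List (List Char)) (c : Nat)
    (h : pvA_isSep ops rows c = true) : pvIsOp (pvCh ops c) = false := by
  by_contra hx
  rw [pv_op_not_sep ops rows c (by revert hx; cases pvIsOp (pvCh ops c) <;> simp)] at h
  exact absurd h (by simp)

-- B's left expansion reaches the run start
theorem pv_lexp_eq (ops : List Char) (rows : List (List Char)) (s : Nat) :
    ∀ i, s ≤ i → (s = 0 ∨ pvA_isSep ops rows (s - 1) = true) →
      (∀ j, s ≤ j → j < i → pvA_isSep ops rows j = false) →
      pvB_lexp ops rows i = s := by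
  intro i
  induction i with
  | zero =>
    intro hsi _ _
    rw [pvB_lexp]; rw [dif_neg (by omega)]; omega
  | succ i ih =>
    intro hsi hfresh hcon
    by_cases hse : s = i + 1
    · rw [pvB_lexp]
      rw [dif_neg (by
        intro hx
        rcases hfresh with h0 | hsep
        · omega
        · rw [← hse] at hx; rw [pv_sep_eq, hsep] at hx; exact absurd hx.2 (by simp))]
      omega
    · have hi : pvA_isSep ops rows i = false := hcon i (by omega) (by omega)
      rw [pvB_lexp]
      rw [dif_pos ⟨by omega, by simpa [pv_sep_eq] using hi⟩]
      exact ih (by omega) hfresh (fun j h1 h2 => hcon j h1 (by omega))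

-- skipping non-operator columns in A's first-operator scan
theorem pv_findOp_skip (ops : List Char) :
    ∀ k s e, s + k ≤ e → (∀ j, s ≤ j → j < s + k → pvIsOp (pvCh ops j) = false) →
      pvA_findOp ops (List.range' s (e - s)) = pvA_findOp ops (List.range' (s + k) (e - (s + k))) := by
  intro k
  induction k with
  | zero => intro s e _ _; rfl
  | succ k ih =>
    intro s e hle hno
    have h1 : e - s = (e - (s + 1)) + 1 := by omega
    rw [h1, List.range'_succ, pvA_findOp, if_neg (by simp [hno s (by omega) (by omega)])]
    have := ih (s + 1) e (by omega) (fun j hj1 hj2 => hno j (by omega) (by omega))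
    rw [show s + (k + 1) = (s + 1) + k by omega]
    exact this

theorem pv_findOp_hit (ops : List Char) (p e : Nat) (hpe : p < e)
    (hop : pvIsOp (pvCh ops p) = true) :
    pvA_findOp ops (List.range' p (e - p)) = some (String.ofList [pvCh ops p]) := by
  rw [show e - p = (e - (p + 1)) + 1 by omega, List.range'_succ, pvA_findOp, if_pos hop]

theorem pvA_skipCon_le (ops : List Char) (rows : List (List Char)) (width col : Nat) :
    col ≤ width → pvA_skipCon ops rows width col ≤ width := by
  fun_induction pvA_skipCon ops rows width col with
  | case1 c h ih => intro _; exact ih (by omega)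
  | case2 c h => intro hh; exact hh

theorem pvA_skipCon_idem (ops : List Char) (rows : List (List Char)) (width col : Nat) :
    pvA_skipCon ops rows width (pvA_skipCon ops rows width col)
      = pvA_skipCon ops rows width col := by
  fun_induction pvA_skipCon ops rows width col with
  | case1 c h ih => exact ih
  | case2 c h => rw [pvA_skipCon]; rw [dif_neg h]

-- folding one A-band step back into pvA_bands
theorem pvA_bands_stop (ops : List Char) (rows : List (List Char)) (width col : Nat)
    (h : ¬ col < width) : pvA_bands ops rows width col = [] := by
  rw [pvA_bands]; rw [dif_neg h]

theorem pvA_skipSep_eq_self (ops : List Char) (rows : List (List Char)) (width col : Nat)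
    (h : ¬ (col < width ∧ pvA_isSep ops rows col = true)) :
    pvA_skipSep ops rows width col = col := by
  rw [pvA_skipSep]; rw [dif_neg h]

theorem pvA_skipCon_eq_self (ops : List Char) (rows : List (List Char)) (width col : Nat)
    (h : ¬ (col < width ∧ pvA_isSep ops rows col = false)) :
    pvA_skipCon ops rows width col = col := by
  rw [pvA_skipCon]; rw [dif_neg (by intro hx; exact h ⟨hx.1, by simpa using hx.2⟩)]

theorem pvA_bands_sep (ops : List Char) (rows : List (List Char)) (width col : Nat)
    (h1 : col < width) (h2 : pvA_isSep ops rows col = true) :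
    pvA_bands ops rows width col = pvA_bands ops rows width (col + 1) := by
  have hs : pvA_skipSep ops rows width col = pvA_skipSep ops rows width (col + 1) := by
    rw [pvA_skipSep]; rw [dif_pos ⟨h1, h2⟩]
  by_cases h3 : col + 1 < width
  · rw [pvA_bands]; rw [dif_pos h1, hs]
    conv_rhs => rw [pvA_bands]
    rw [dif_pos h3]
  · have : pvA_skipSep ops rows width (col + 1) = col + 1 :=
      pvA_skipSep_eq_self ops rows width (col + 1) (by intro hx; omega)
    rw [pvA_bands]; rw [dif_pos h1, hs, this, pvA_bands_stop ops rows width (col + 1) h3,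
        dif_pos (by omega)]

-- A's band emission for a run [s, e)
def pvA_emit (ops : List Char) (s e : Nat) : List (Int × Int × String) :=
  match pvA_findOp ops (List.range' s (e - s)) with
  | none => []
  | some op => [((s : Int), (e : Int), op)]

theorem pvA_bands_open (ops : List Char) (rows : List (List Char)) (width col : Nat)
    (h1 : col < width) (h2 : pvA_isSep ops rows col = false) :
    pvA_bands ops rows width col =
      pvA_emit ops col (pvA_skipCon ops rows width col)
        ++ pvA_bands ops rows width (pvA_skipCon ops rows width col) := by
  have hs : pvA_skipSep ops rows width col = col :=
    pvA_skipSep_eq_self ops rows width col (by intro hx; rw [h2] at hx; exact absurd hx.2 (by simp))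
  rw [pvA_bands]; rw [dif_pos h1, hs, dif_neg (by omega)]
  rw [pvA_emit]
  cases pvA_findOp ops (List.range' col (pvA_skipCon ops rows width col - col)) <;> simp

-- absorbing one emitted run back into bands, for any column
theorem pv_bands_eq_emit (ops : List Char) (rows : List (List Char)) (width c : Nat)
    (h : c ≤ width) :
    pvA_emit ops c (pvA_skipCon ops rows width c)
        ++ pvA_bands ops rows width (pvA_skipCon ops rows width c)
      = pvA_bands ops rows width c := by
  by_cases h1 : c < width
  · cases h2 : pvA_isSep ops rows c with
    | false => exact (pvA_bands_open ops rows width c h1 h2).symm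
    | true =>
      have hc : pvA_skipCon ops rows width c = c :=
        pvA_skipCon_eq_self ops rows width c (by intro hx; rw [h2] at hx; simp at hx)
      rw [hc, pvA_emit]
      simp [pvA_findOp]
  · have hc : pvA_skipCon ops rows width c = c :=
      pvA_skipCon_eq_self ops rows width c (by intro hx; omega)
    rw [hc, pvA_emit]
    simp [pvA_findOp]

-- the main correspondence: B's operator walk from column i inside a run starting at s
-- produces exactly A's emitted band for that run followed by the remaining bands
theorem pv_walk (ops : List Char) (rows : List (List Char)) (width : Nat) :
    ∀ n i s, width - i = n → s ≤ i → i ≤ width →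
      (s = 0 ∨ pvA_isSep ops rows (s - 1) = true ∨ pvA_isSep ops rows s = true ∨ width ≤ s) →
      (∀ j, s ≤ j → j < i → pvA_isSep ops rows j = false ∧ pvIsOp (pvCh ops j) = false) →
      pvB_loop ops rows width i =
        pvA_emit ops s (pvA_skipCon ops rows width i)
          ++ pvA_bands ops rows width (pvA_skipCon ops rows width i) := by
  intro n
  induction n using Nat.strong_induction_on with
  | _ n ih =>
    intro i s hn hsi hiw hfresh hrun
    by_cases hi : i < width
    · cases hsep : pvA_isSep ops rows i with
      | true =>
        -- separator column: B steps by one, the run [s,i) had no operator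
        have hno : pvIsOp (pvCh ops i) = false := pv_sep_not_op ops rows i hsep
        have hcself : pvA_skipCon ops rows width i = i :=
          pvA_skipCon_eq_self ops rows width i (by intro hx; rw [hsep] at hx; simp at hx)
        rw [pvB_loop]
        rw [dif_pos hi, if_neg (by simp [hno])]
        rw [ih (width - (i + 1)) (by omega) (i + 1) (i + 1) rfl (by omega) (by omega)
              (Or.inr (Or.inl (by simpa using hsep))) (by intro j h1 h2; omega)]
        rw [pv_bands_eq_emit ops rows width (i + 1) (by omega), hcself]
        rw [pvA_emit]
        rw [pv_findOp_skip ops (i - s) s i (by omega)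
              (fun j hj1 hj2 => (hrun j hj1 (by omega)).2)]
        rw [show s + (i - s) = i by omega]
        simp only [Nat.sub_self, List.range'_zero, pvA_findOp, List.nil_append]
        exact (pvA_bands_sep ops rows width i hi hsep).symm
      | false =>
        cases hop : pvIsOp (pvCh ops i) with
        | true =>
          -- operator column: B emits the whole run and jumps past it
          have hfresh' : s = 0 ∨ pvA_isSep ops rows (s - 1) = true := by
            rcases hfresh with h | h | h | h
            · exact Or.inl h
            · exact Or.inr h
            · by_cases hs : s = i
              · rw [hs, hsep] at h; exact absurd h (by simp)
              · rw [(hrun s le_rfl (by omega)).1] at h; exact absurd h (by simp)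
            · omega
          have hL : pvB_lexp ops rows i = s :=
            pv_lexp_eq ops rows s i hsi hfresh'
              (fun j h1 h2 => (hrun j h1 h2).1)
          have hstep : pvA_skipCon ops rows width i = pvA_skipCon ops rows width (i + 1) :=
            pvA_skipCon_step ops rows width i hi hsep
          have hR : pvB_rexp ops rows width (i + 1) = pvA_skipCon ops rows width i := by
            rw [pv_rexp_eq, hstep]
          set e := pvA_skipCon ops rows width i with he
          have hie : i + 1 ≤ e := pvA_skipCon_gt ops rows width i hi hsep
          have hew : e ≤ width := by
            rw [he]; exact pvA_skipCon_le ops rows width i (by omega)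
          have hemit : pvA_emit ops s e = [((s : Int), (e : Int), String.ofList [pvCh ops i])] := by
            rw [pvA_emit]
            rw [pv_findOp_skip ops (i - s) s e (by omega)
                  (fun j hj1 hj2 => (hrun j hj1 (by omega)).2)]
            rw [show s + (i - s) = i by omega, pv_findOp_hit ops i e (by omega) hop]
          rw [pvB_loop]
          rw [dif_pos hi, if_pos hop, hL, hR, hemit]
          have hrest : pvB_loop ops rows width e = pvA_bands ops rows width e := by
            have hsepe : pvA_isSep ops rows e = true ∨ width ≤ e := by
              by_cases hew2 : e < width
              · left
                by_contra hx
                have hx' : pvA_isSep ops rows e = false := by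
                  revert hx; cases pvA_isSep ops rows e <;> simp
                have hstep2 := pvA_skipCon_step ops rows width e hew2 hx'
                have hge := pvA_skipCon_ge ops rows width (e + 1)
                -- e = skipCon i, but skipCon is idempotent: contradiction
                have hfix := pvA_skipCon_idem ops rows width i
                rw [← he] at hfix
                omega
              · right; omega
            rw [ih (width - e) (by omega) e e rfl le_rfl hew
                  (by rcases hsepe with h | h
                      · exact Or.inr (Or.inr (Or.inl h))
                      · exact Or.inr (Or.inr (Or.inr h)))
                  (by intro j h1 h2; omega)]
            exact pv_bands_eq_emit ops rows width e hew
          rw [hrest]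
          simp
        | false =>
          -- plain content column: B steps by one inside the same run
          have hstep : pvA_skipCon ops rows width i = pvA_skipCon ops rows width (i + 1) :=
            pvA_skipCon_step ops rows width i hi hsep
          rw [pvB_loop]
          rw [dif_pos hi, if_neg (by simp [hop])]
          rw [ih (width - (i + 1)) (by omega) (i + 1) s rfl (by omega) (by omega) hfresh
                (by intro j h1 h2
                    by_cases hj : j = i
                    · subst hj; exact ⟨hsep, hop⟩
                    · exact hrun j h1 (by omega)), ← hstep]
    · -- i = width: B stops; the run [s, width) had no operator, A emits nothing more
      have hiw' : i = width := by omega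
      have hcself : pvA_skipCon ops rows width i = i :=
        pvA_skipCon_eq_self ops rows width i (by intro hx; omega)
      rw [pvB_loop]
      rw [dif_neg hi, hcself, pvA_bands_stop ops rows width i (by omega)]
      rw [pvA_emit]
      rw [pv_findOp_skip ops (i - s) s i (by omega)
            (fun j hj1 hj2 => (hrun j hj1 (by omega)).2)]
      rw [show s + (i - s) = i by omega]
      simp [pvA_findOp]

theorem pv_loop_eq_bands (ops : List Char) (rows : List (List Char)) (width : Nat) :
    pvB_loop ops rows width 0 = pvA_bands ops rows width 0 := by
  rw [pv_walk ops rows width (width - 0) 0 0 rfl le_rfl (by omega) (Or.inl rfl)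
        (by intro j h1 h2; omega)]
  exact pv_bands_eq_emit ops rows width 0 (by omega)

-- ===== VERDICT (by name: the statement is the Claim_ definition above) =====
theorem split_into_bands_py_spec : Claim_equal_split_into_bands_py := by
  intro lines _ _
  unfold Spec_split_into_bands_py
  match lines with
  | [] => rfl
  | a :: as =>
    rw [split_into_bands_py, split_into_bands_py_alt]
    set ops := ((a :: as).getLastD "").toList
    set rows := ((a :: as).dropLast).map String.toList
    have hW := pv_lastUsed_eq ops rows
    by_cases hw : pvB_widthRev ops rows ops.length = 0
    · rw [if_pos (by rw [hW, hw]; rfl), hw]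
      rw [pvB_loop]; rw [dif_neg (by omega)]
    · rw [if_neg (by rw [hW]; omega)]
      have hT : (pvA_lastUsed ops rows + 1).toNat = pvB_widthRev ops rows ops.length := by
        rw [hW]; omega
      rw [hT, pv_loop_eq_bands]
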